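-- pv_equiv track=rewrite | github.com/jamil-said/code-samples | Python_code_challenges/packageBoxing.py | packageBoxing
-- ===== SOURCE A (Python) =====
-- def packageBoxing(pkg, boxes):
--     result, vol, minVol, dicBox = -1, 1, float('inf'), {}
--     sortPkg = sorted(pkg)
--     sortBox = [sorted(i) for i in boxes]
--     for i, elem in enumerate(sortBox):
--         for j in range(3):
--             if sortPkg[j] > elem[j]: dicBox[i] = -1
--     for i, elem in enumerate(boxes):
--         if i not in dicBox:
--             for j in elem:
--                 vol *= j
--             if vol < minVol: minVol, vol, result = vol, 1, i
--             else: vol = 1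
--     return result
-- ===== SOURCE B (Python) =====
-- def _volume(pair):
--     v = 1
--     for d in pair[1]:
--         v *= d
--     return v
--
-- def packageBoxing(pkg, boxes):
--     sp = sorted(pkg)
--     for i, box in sorted(enumerate(boxes), key=_volume):
--         sb = sorted(box)
--         if sp[0] <= sb[0] and sp[1] <= sb[1] and sp[2] <= sb[2]:
--             return i
--     return -1
-- ===== Notes on version B (the rewrite author's own statement) =====
-- stated objective: alternative
-- what changed: B replaces A's two-phase scheme (a dict of non-fitting indices, then a second scan tracking a running minimum volume with manual resets) by sort-then-first-fit: it stably sorts the enumerated boxes by volume and returns the index of the first box in that order whose three smallest dimensions cover the sorted package; no dict and no running minimum exist in B.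
import Mathlib
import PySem

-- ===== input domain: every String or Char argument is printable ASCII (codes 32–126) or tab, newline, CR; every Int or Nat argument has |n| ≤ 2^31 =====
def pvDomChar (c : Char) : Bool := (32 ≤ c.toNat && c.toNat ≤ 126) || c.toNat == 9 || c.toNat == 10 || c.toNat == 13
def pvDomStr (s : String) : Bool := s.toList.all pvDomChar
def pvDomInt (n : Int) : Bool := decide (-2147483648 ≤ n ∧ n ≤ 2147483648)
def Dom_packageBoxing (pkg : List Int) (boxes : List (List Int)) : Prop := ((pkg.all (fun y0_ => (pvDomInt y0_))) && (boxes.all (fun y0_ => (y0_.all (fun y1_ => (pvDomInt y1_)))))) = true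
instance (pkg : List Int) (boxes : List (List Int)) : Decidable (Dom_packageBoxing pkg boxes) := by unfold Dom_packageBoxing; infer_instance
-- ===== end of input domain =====

-- B replaces A's two passes (a dict of rejected indices, then a running-minimum volume scan)
-- by sort-then-first-fit: stably sort the enumerated boxes by volume, return the first fitting index.

-- ===== PORT A =====
-- A's inner 'for j in range(3): if sortPkg[j] > elem[j]: dicBox[i] = -1' for one enumerated elem
def pvMarkBox (sortPkg : List Int) (d : PySem.Dict Int Int) (p : Int × List Int) : PySem.Dict Int Int :=
  (PySem.List.pyRange 0 3 1).foldl
    (fun d' j => if PySem.List.pyGetD sortPkg j 0 > PySem.List.pyGetD p.2 j 0 then d'.insert p.1 (-1) else d') d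

-- one iteration of A's second loop; state = (result, vol, minVol), none = float('inf')
def pvAStep (dicBox : PySem.Dict Int Int) (st : Int × Int × Option Int) (p : Int × List Int) :
    Int × Int × Option Int :=
  if dicBox.contains p.1 = false then
    let vol := p.2.foldl (fun v j => v * j) st.2.1
    if (match st.2.2 with | none => true | some b => decide (vol < b)) = true then (p.1, 1, some vol)
    else (st.1, 1, st.2.2)
  else st

def packageBoxing (pkg : List Int) (boxes : List (List Int)) : Int :=
  let sortPkg := PySem.List.sorted pkg (fun x => x) false
  let sortBox := boxes.map (fun b => PySem.List.sorted b (fun x => x) false)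
  let dicBox := (PySem.List.enumerate sortBox 0).foldl (pvMarkBox sortPkg) PySem.Dict.empty
  ((PySem.List.enumerate boxes 0).foldl (pvAStep dicBox) (-1, 1, none)).1

-- ===== PORT B =====
-- Source B's _volume(pair): the product of the box's dimensions
def pvVolKey (p : Int × List Int) : Int := p.2.foldl (fun v d => v * d) 1

-- Source B's for-loop over the volume-sorted pairs: return the first fitting index, else -1
def pvFindFit (sp : List Int) : List (Int × List Int) → Int
  | [] => -1
  | p :: rest =>
    let sb := PySem.List.sorted p.2 (fun x => x) false
    if PySem.List.pyGetD sp 0 0 ≤ PySem.List.pyGetD sb 0 0 ∧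
       PySem.List.pyGetD sp 1 0 ≤ PySem.List.pyGetD sb 1 0 ∧
       PySem.List.pyGetD sp 2 0 ≤ PySem.List.pyGetD sb 2 0 then p.1
    else pvFindFit sp rest

def packageBoxing_alt (pkg : List Int) (boxes : List (List Int)) : Int :=
  let sp := PySem.List.sorted pkg (fun x => x) false
  pvFindFit sp (PySem.List.sorted (PySem.List.enumerate boxes 0) pvVolKey false)

-- ===== PRECONDITION & SPEC =====
-- A raises IndexError unless boxes is empty or (len(pkg) >= 3 and every box has >= 3 dims);
-- Pre_ admits exactly the inputs where the Python A returns normally.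
def Pre_packageBoxing (pkg : List Int) (boxes : List (List Int)) : Prop :=
  boxes = [] ∨ (3 ≤ pkg.length ∧ ∀ b ∈ boxes, 3 ≤ b.length)
instance (pkg : List Int) (boxes : List (List Int)) : Decidable (Pre_packageBoxing pkg boxes) := by
  unfold Pre_packageBoxing; infer_instance

def pvWitness_packageBoxing : List Int × List (List Int) :=
  ([2, 1, 3], [[3, 3, 3], [1, 1, 1], [4, 2, 3]])

def Spec_packageBoxing (pkg : List Int) (boxes : List (List Int)) (out : Int) : Prop := out = packageBoxing_alt pkg boxes
instance (pkg : List Int) (boxes : List (List Int)) (out : Int) : Decidable (Spec_packageBoxing pkg boxes out) := by unfold Spec_packageBoxing; infer_instance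

-- ===== CLAIM (what is proved, stated in full; the proofs are below) =====
def Claim_equal_packageBoxing : Prop := ∀ (pkg : List Int) (boxes : List (List Int)), Dom_packageBoxing pkg boxes → Pre_packageBoxing pkg boxes → Spec_packageBoxing pkg boxes (packageBoxing pkg boxes)

-- ===== LEMMAS AND PROOFS =====

-- "some first-3 sorted package dim exceeds the corresponding dim of elem" (elem already sorted)
def pvBad (sp elem : List Int) : Bool :=
  decide (PySem.List.pyGetD sp 0 0 > PySem.List.pyGetD elem 0 0) ||
  decide (PySem.List.pyGetD sp 1 0 > PySem.List.pyGetD elem 1 0) ||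
  decide (PySem.List.pyGetD sp 2 0 > PySem.List.pyGetD elem 2 0)

-- B's fit test on a raw box
def pvFit (sp box : List Int) : Bool :=
  let sb := PySem.List.sorted box (fun x => x) false
  decide (PySem.List.pyGetD sp 0 0 ≤ PySem.List.pyGetD sb 0 0 ∧
          PySem.List.pyGetD sp 1 0 ≤ PySem.List.pyGetD sb 1 0 ∧
          PySem.List.pyGetD sp 2 0 ≤ PySem.List.pyGetD sb 2 0)

-- abstract "best so far" as an optional pair; pvRes/pvBest project it back to A's loop state
def pvUpd (sp : List Int) (m : Option (Int × List Int)) (p : Int × List Int) : Option (Int × List Int) :=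
  if pvFit sp p.2 then
    match m with
    | none => some p
    | some q => if pvVolKey p < pvVolKey q then some p else some q
  else m

def pvRes (m : Option (Int × List Int)) : Int := match m with | none => -1 | some q => q.1

def pvBest (m : Option (Int × List Int)) : Option Int := m.map pvVolKey

-- stable order produced by sorting on the volume key, for index-increasing inputs
def pvSrel (a b : Int × List Int) : Prop :=
  pvVolKey a < pvVolKey b ∨ (pvVolKey a = pvVolKey b ∧ a.1 < b.1)

-- the element both loops return: a fitting member minimal in (volume, index)
def pvIsBest (sp : List Int) (L : List (Int × List Int)) (q : Int × List Int) : Prop :=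
  q ∈ L ∧ pvFit sp q.2 = true ∧
  ∀ p ∈ L, pvFit sp p.2 = true →
    (pvVolKey q < pvVolKey p ∨ (pvVolKey q = pvVolKey p ∧ q.1 ≤ p.1))

theorem pvBad_sorted_eq_not_fit (sp box : List Int) :
    pvBad sp (PySem.List.sorted box (fun x => x) false) = !(pvFit sp box) := by
  simp [pvBad, pvFit, Bool.or_assoc, ← decide_not, not_le]

theorem contains_pvMarkBox (sp : List Int) (d : PySem.Dict Int Int) (p : Int × List Int) (k : Int) :
    ((pvMarkBox sp d p).contains k) = (d.contains k || ((k == p.1) && pvBad sp p.2)) := by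
  have h3 : PySem.List.pyRange 0 3 1 = [0, 1, 2] := by decide
  unfold pvMarkBox
  rw [h3]
  simp only [List.foldl_cons, List.foldl_nil]
  split_ifs <;> rename_i h0 h1 h2 <;>
    simp [PySem.Dict.contains_insert, pvBad, h0, h1, h2] <;> cases (k == p.1) <;> simp

theorem contains_markFold (sp : List Int) :
    ∀ (L : List (Int × List Int)) (d : PySem.Dict Int Int) (k : Int),
    ((L.foldl (pvMarkBox sp) d).contains k) = (d.contains k || L.any (fun p => (k == p.1) && pvBad sp p.2)) := by
  intro L
  induction L with
  | nil => intro d k; simp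
  | cons p L ih =>
      intro d k
      simp only [List.foldl_cons, List.any_cons, ih, contains_pvMarkBox, Bool.or_assoc]

theorem any_enumerate_lt {α : Type} (g : α → Bool) :
    ∀ (xs : List α) (s t : Int), t < s →
    (PySem.List.enumerate xs s).any (fun q => (t == q.1) && g q.2) = false := by
  intro xs
  induction xs with
  | nil => intro s t h; simp [PySem.List.enumerate_nil]
  | cons x xs ih =>
      intro s t h
      rw [PySem.List.enumerate_cons]
      simp only [List.any_cons, ih (s + 1) t (by omega), Bool.or_false]
      have : (t == s) = false := by simp; omega
      simp [this]

theorem any_enumerate_eq {α : Type} (g : α → Bool) :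
    ∀ (xs : List α) (s : Int) (j : Nat), (h : j < xs.length) →
    (PySem.List.enumerate xs s).any (fun q => ((s + (j : Int)) == q.1) && g q.2) = g xs[j] := by
  intro xs
  induction xs with
  | nil => intro s j h; simp at h
  | cons x xs ih =>
      intro s j h
      rw [PySem.List.enumerate_cons]
      cases j with
      | zero =>
          simp only [List.any_cons]
          rw [any_enumerate_lt g xs (s + 1) (s + ((0 : Nat) : Int)) (by simp)]
          simp
      | succ k =>
          simp only [List.any_cons]
          have h1 : ((s + ((k + 1 : Nat) : Int)) == s) = false := by simp; omega
          have h2 : (s + ((k + 1 : Nat) : Int)) = (s + 1) + (k : Int) := by push_cast; ring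
          rw [h1, h2, ih (s + 1) k (by simpa using h)]
          simp

-- one A-iteration tracks pvUpd through the (pvRes, 1, pvBest) representation
theorem stepA_eq (sp : List Int) (dic : PySem.Dict Int Int) (p : Int × List Int)
    (hp : dic.contains p.1 = !(pvFit sp p.2)) (m : Option (Int × List Int)) :
    pvAStep dic (pvRes m, 1, pvBest m) p = (pvRes (pvUpd sp m p), 1, pvBest (pvUpd sp m p)) := by
  unfold pvAStep pvUpd
  by_cases hfit : pvFit sp p.2 = true
  · have hcon : dic.contains p.1 = false := by rw [hp, hfit]; rfl
    simp only [hcon, hfit, if_pos]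
    cases m with
    | none => simp [pvRes, pvBest, pvVolKey]
    | some q =>
        simp only [pvBest, pvRes, Option.map_some]
        by_cases hlt : List.foldl (fun v j => v * j) 1 p.2 < List.foldl (fun v j => v * j) 1 q.2
        · simp [hlt, pvVolKey]
        · simp [hlt, pvVolKey]
  · have hfit' : pvFit sp p.2 = false := by revert hfit; cases pvFit sp p.2 <;> simp
    have hcon : dic.contains p.1 = true := by rw [hp, hfit']; rfl
    simp [hcon, hfit']

theorem foldA_eq (sp : List Int) (dic : PySem.Dict Int Int) :
    ∀ (L : List (Int × List Int)) (m : Option (Int × List Int)),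
    (∀ p ∈ L, dic.contains p.1 = !(pvFit sp p.2)) →
    L.foldl (pvAStep dic) (pvRes m, 1, pvBest m) =
      (pvRes (L.foldl (pvUpd sp) m), 1, pvBest (L.foldl (pvUpd sp) m)) := by
  intro L
  induction L with
  | nil => intro m h; simp
  | cons p L ih =>
      intro m h
      simp only [List.foldl_cons]
      rw [stepA_eq sp dic p (h p (by simp)) m]
      exact ih (pvUpd sp m p) (fun q hq => h q (by simp [hq]))

-- B's loop is find? on the sorted list, projected by pvRes
theorem pvFindFit_eq_find? (sp : List Int) :
    ∀ (L : List (Int × List Int)),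
    pvFindFit sp L = pvRes (L.find? (fun p => pvFit sp p.2)) := by
  intro L
  induction L with
  | nil => rfl
  | cons p L ih =>
      show (if PySem.List.pyGetD sp 0 0 ≤ PySem.List.pyGetD (PySem.List.sorted p.2 (fun x => x) false) 0 0 ∧
              PySem.List.pyGetD sp 1 0 ≤ PySem.List.pyGetD (PySem.List.sorted p.2 (fun x => x) false) 1 0 ∧
              PySem.List.pyGetD sp 2 0 ≤ PySem.List.pyGetD (PySem.List.sorted p.2 (fun x => x) false) 2 0
            then p.1 else pvFindFit sp L) = pvRes ((p :: L).find? (fun p => pvFit sp p.2))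
      by_cases h : pvFit sp p.2 = true
      · have h' : PySem.List.pyGetD sp 0 0 ≤ PySem.List.pyGetD (PySem.List.sorted p.2 (fun x => x) false) 0 0 ∧
              PySem.List.pyGetD sp 1 0 ≤ PySem.List.pyGetD (PySem.List.sorted p.2 (fun x => x) false) 1 0 ∧
              PySem.List.pyGetD sp 2 0 ≤ PySem.List.pyGetD (PySem.List.sorted p.2 (fun x => x) false) 2 0 := by
          simpa [pvFit] using h
        rw [if_pos h']
        simp only [List.find?_cons, h]
        rfl
      · have h' : ¬(PySem.List.pyGetD sp 0 0 ≤ PySem.List.pyGetD (PySem.List.sorted p.2 (fun x => x) false) 0 0 ∧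
              PySem.List.pyGetD sp 1 0 ≤ PySem.List.pyGetD (PySem.List.sorted p.2 (fun x => x) false) 1 0 ∧
              PySem.List.pyGetD sp 2 0 ≤ PySem.List.pyGetD (PySem.List.sorted p.2 (fun x => x) false) 2 0) := by
          simpa [pvFit] using h
        have hf : pvFit sp p.2 = false := by revert h; cases pvFit sp p.2 <;> simp
        rw [if_neg h']
        simp only [List.find?_cons, hf]
        exact ih

-- volume-sorting an index-increasing list yields the stable order pvSrel
theorem insertBy_pairwise_srel (x : Int × List Int) :
    ∀ (acc : List (Int × List Int)), acc.Pairwise pvSrel → (∀ y ∈ acc, y.1 < x.1) →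
    (PySem.List.insertBy (fun a b => decide (pvVolKey a < pvVolKey b)) x acc).Pairwise pvSrel := by
  intro acc
  induction acc with
  | nil => intro _ _; simp [PySem.List.insertBy, pvSrel]
  | cons y ys ih =>
      intro hpw hlt
      rw [List.pairwise_cons] at hpw
      obtain ⟨hy, hys⟩ := hpw
      show (if decide (pvVolKey x < pvVolKey y) = true then x :: y :: ys
            else y :: PySem.List.insertBy (fun a b => decide (pvVolKey a < pvVolKey b)) x ys).Pairwise pvSrel
      by_cases hxy : pvVolKey x < pvVolKey y
      · simp only [hxy, decide_true, if_true]
        refine List.Pairwise.cons ?_ (List.Pairwise.cons hy hys)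
        intro z hz
        rcases List.mem_cons.mp hz with rfl | hz
        · exact Or.inl hxy
        · have hyz := hy z hz
          have hle : pvVolKey y ≤ pvVolKey z := hyz.elim le_of_lt (fun h => le_of_eq h.1)
          exact Or.inl (lt_of_lt_of_le hxy hle)
      · simp only [hxy, decide_false, Bool.false_eq_true, if_false]
        refine List.Pairwise.cons ?_ (ih hys (fun z hz => hlt z (by simp [hz])))
        intro z hz
        rw [PySem.List.mem_insertBy] at hz
        rcases hz with rfl | hz
        · rcases lt_or_eq_of_le (not_lt.mp hxy) with h | h
          · exact Or.inl h
          · exact Or.inr ⟨h, hlt y (by simp)⟩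
        · exact hy z hz

theorem foldl_insertBy_pairwise_srel :
    ∀ (L acc : List (Int × List Int)), acc.Pairwise pvSrel →
    (∀ y ∈ acc, ∀ x ∈ L, y.1 < x.1) → L.Pairwise (fun a b => a.1 < b.1) →
    (L.foldl (fun acc x => PySem.List.insertBy (fun a b => decide (pvVolKey a < pvVolKey b)) x acc) acc).Pairwise pvSrel := by
  intro L
  induction L with
  | nil => intro acc h _ _; simpa using h
  | cons x L ih =>
      intro acc hacc hcross hL
      rw [List.pairwise_cons] at hL
      obtain ⟨hxL, hL'⟩ := hL
      simp only [List.foldl_cons]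
      refine ih _ (insertBy_pairwise_srel x acc hacc (fun y hy => hcross y hy x (by simp))) ?_ hL'
      intro y hy z hz
      rw [PySem.List.mem_insertBy] at hy
      rcases hy with rfl | hy
      · exact hxL z hz
      · exact hcross y hy z (by simp [hz])

theorem sorted_pairwise_srel (L : List (Int × List Int))
    (hL : L.Pairwise (fun a b => a.1 < b.1)) :
    (PySem.List.sorted L pvVolKey false).Pairwise pvSrel := by
  rw [PySem.List.sorted_eq_foldl_insertBy]
  exact foldl_insertBy_pairwise_srel L [] (by simp) (by simp) hL

-- find? on a pvSrel-sorted list returns the best element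
theorem find?_some_best (sp : List Int) :
    ∀ (S : List (Int × List Int)), S.Pairwise pvSrel →
    ∀ q, S.find? (fun p => pvFit sp p.2) = some q → pvIsBest sp S q := by
  intro S
  induction S with
  | nil => intro _ q h; simp at h
  | cons x S ih =>
      intro hpw q hq
      rw [List.pairwise_cons] at hpw
      obtain ⟨hx, hS⟩ := hpw
      by_cases hfx : pvFit sp x.2 = true
      · simp only [List.find?_cons, hfx] at hq
        obtain rfl : x = q := by injection hq
        refine ⟨by simp, hfx, ?_⟩
        intro p hp _
        rcases List.mem_cons.mp hp with rfl | hp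
        · exact Or.inr ⟨rfl, le_refl _⟩
        · rcases hx p hp with h | ⟨h1, h2⟩
          · exact Or.inl h
          · exact Or.inr ⟨h1, le_of_lt h2⟩
      · have hfx' : pvFit sp x.2 = false := by revert hfx; cases pvFit sp x.2 <;> simp
        simp only [List.find?_cons, hfx'] at hq
        obtain ⟨hmem, hfq, hall⟩ := ih hS q hq
        refine ⟨by simp [hmem], hfq, ?_⟩
        intro p hp hfp
        rcases List.mem_cons.mp hp with rfl | hp
        · exact absurd hfp hfx
        · exact hall p hp hfp

-- the min-tracking fold returns the best element (or none iff nothing fits)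
theorem foldl_upd_best (sp : List Int) :
    ∀ (L : List (Int × List Int)), L.Pairwise (fun a b => a.1 < b.1) →
    ((L.foldl (pvUpd sp) none = none → ∀ p ∈ L, pvFit sp p.2 = false) ∧
     (∀ q, L.foldl (pvUpd sp) none = some q → pvIsBest sp L q)) := by
  intro L
  induction L using List.reverseRecOn with
  | nil =>
      intro _
      exact ⟨fun _ p hp => absurd hp (by simp), fun q h => by simp at h⟩
  | append_singleton L x ih =>
      intro hpw
      rw [List.pairwise_append] at hpw
      obtain ⟨hL, _, hcross⟩ := hpw
      obtain ⟨ihn, ihs⟩ := ih hL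
      rw [List.foldl_append]
      simp only [List.foldl_cons, List.foldl_nil]
      cases hF : L.foldl (pvUpd sp) none with
      | none =>
          have hnofit := ihn hF
          constructor
          · intro hup p hp
            rcases List.mem_append.mp hp with hp | hp
            · exact hnofit p hp
            · obtain rfl : p = x := by simpa using hp
              by_contra hfx
              have hfx' : pvFit sp p.2 = true := by revert hfx; cases pvFit sp p.2 <;> simp
              unfold pvUpd at hup
              rw [if_pos hfx'] at hup
              exact absurd hup (by simp)
          · intro q hq
            unfold pvUpd at hq
            by_cases hfx : pvFit sp x.2 = true
            · rw [if_pos hfx] at hq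
              obtain rfl : x = q := by injection hq
              refine ⟨by simp, hfx, ?_⟩
              intro p hp hfp
              rcases List.mem_append.mp hp with hp | hp
              · exact absurd hfp (by simp [hnofit p hp])
              · obtain rfl : p = x := by simpa using hp
                exact Or.inr ⟨rfl, le_refl _⟩
            · rw [if_neg hfx] at hq
              exact absurd hq (by simp)
      | some m =>
          obtain ⟨hmem, hfm, hall⟩ := ihs m hF
          have hmx : m.1 < x.1 := hcross m hmem x (by simp)
          constructor
          · intro hup
            exfalso
            unfold pvUpd at hup
            by_cases hfx : pvFit sp x.2 = true
            · rw [if_pos hfx] at hup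
              change (if pvVolKey x < pvVolKey m then some x else some m) = none at hup
              by_cases hlt : pvVolKey x < pvVolKey m
              · rw [if_pos hlt] at hup; exact absurd hup (by simp)
              · rw [if_neg hlt] at hup; exact absurd hup (by simp)
            · rw [if_neg hfx] at hup
              exact absurd hup (by simp)
          · intro q hq
            unfold pvUpd at hq
            by_cases hfx : pvFit sp x.2 = true
            · rw [if_pos hfx] at hq
              change (if pvVolKey x < pvVolKey m then some x else some m) = some q at hq
              by_cases hlt : pvVolKey x < pvVolKey m
              · rw [if_pos hlt] at hq
                obtain rfl : x = q := by injection hq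
                refine ⟨by simp, hfx, ?_⟩
                intro p hp hfp
                rcases List.mem_append.mp hp with hp | hp
                · rcases hall p hp hfp with h | ⟨h1, _⟩
                  · exact Or.inl (lt_trans hlt h)
                  · exact Or.inl (lt_of_lt_of_eq hlt h1)
                · obtain rfl : p = x := by simpa using hp
                  exact Or.inr ⟨rfl, le_refl _⟩
              · rw [if_neg hlt] at hq
                obtain rfl : m = q := by injection hq
                refine ⟨by simp [hmem], hfm, ?_⟩
                intro p hp hfp
                rcases List.mem_append.mp hp with hp | hp
                · exact hall p hp hfp
                · obtain rfl : p = x := by simpa using hp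
                  rcases lt_or_eq_of_le (not_lt.mp hlt) with h | h
                  · exact Or.inl h
                  · exact Or.inr ⟨h, le_of_lt hmx⟩
            · rw [if_neg hfx] at hq
              obtain rfl : m = q := by injection hq
              refine ⟨by simp [hmem], hfm, ?_⟩
              intro p hp hfp
              rcases List.mem_append.mp hp with hp | hp
              · exact hall p hp hfp
              · obtain rfl : p = x := by simpa using hp
                exact absurd hfp hfx

-- an index-increasing list has at most one best element
theorem best_unique (sp : List Int) (L : List (Int × List Int))
    (hL : L.Pairwise (fun a b => a.1 < b.1))
    {q q' : Int × List Int} (h : pvIsBest sp L q) (h' : pvIsBest sp L q') : q = q' := by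
  obtain ⟨hm, hf, ha⟩ := h
  obtain ⟨hm', hf', ha'⟩ := h'
  have h1 := ha q' hm' hf'
  have h2 := ha' q hm hf
  have hidx : q.1 = q'.1 := by
    rcases h1 with h1 | ⟨e1, l1⟩ <;> rcases h2 with h2 | ⟨e2, l2⟩ <;> omega
  obtain ⟨i, hi, rfl⟩ := List.getElem_of_mem hm
  obtain ⟨j, hj, rfl⟩ := List.getElem_of_mem hm'
  rw [List.pairwise_iff_getElem] at hL
  rcases lt_trichotomy i j with hij | rfl | hij
  · exact absurd hidx (by have := hL i j hi hj hij; omega)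
  · rfl
  · exact absurd hidx (by have := hL j i hj hi hij; omega)

-- membership-only transfer of pvIsBest along a permutation
theorem best_of_perm (sp : List Int) {S L : List (Int × List Int)} (hperm : S.Perm L)
    {q : Int × List Int} (h : pvIsBest sp S q) : pvIsBest sp L q := by
  obtain ⟨hm, hf, ha⟩ := h
  exact ⟨hperm.mem_iff.mp hm, hf, fun p hp hfp => ha p (hperm.mem_iff.mpr hp) hfp⟩

-- core: find? on the volume-sorted list = the min-tracking fold, after pvRes
theorem find?_sorted_eq_fold (sp : List Int) (L : List (Int × List Int))
    (hL : L.Pairwise (fun a b => a.1 < b.1)) :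
    pvRes ((PySem.List.sorted L pvVolKey false).find? (fun p => pvFit sp p.2)) =
      pvRes (L.foldl (pvUpd sp) none) := by
  have hperm := PySem.List.sorted_perm L pvVolKey false
  have hpw := sorted_pairwise_srel L hL
  obtain ⟨hFn, hFs⟩ := foldl_upd_best sp L hL
  cases hG : (PySem.List.sorted L pvVolKey false).find? (fun p => pvFit sp p.2) with
  | none =>
      have hnofit : ∀ p ∈ L, ¬ (pvFit sp p.2 = true) := by
        intro p hp
        have := List.find?_eq_none.mp hG p (hperm.mem_iff.mpr hp)
        simpa using this
      cases hF : L.foldl (pvUpd sp) none with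
      | none => rfl
      | some q =>
          obtain ⟨hm, hf, _⟩ := hFs q hF
          exact absurd hf (hnofit q hm)
  | some q =>
      have hbest := best_of_perm sp hperm (find?_some_best sp _ hpw q hG)
      cases hF : L.foldl (pvUpd sp) none with
      | none =>
          obtain ⟨hm, hf, _⟩ := hbest
          exact absurd hf (by simp [hFn hF q hm])
      | some q' =>
          rw [best_unique sp L hL hbest (hFs q' hF)]

theorem final_eq (pkg : List Int) (boxes : List (List Int)) :
    packageBoxing pkg boxes = packageBoxing_alt pkg boxes := by
  have hyp : ∀ p ∈ PySem.List.enumerate boxes 0,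
      ((PySem.List.enumerate (boxes.map (fun b => PySem.List.sorted b (fun x => x) false)) 0).foldl
        (pvMarkBox (PySem.List.sorted pkg (fun x => x) false)) PySem.Dict.empty).contains p.1
      = !(pvFit (PySem.List.sorted pkg (fun x => x) false) p.2) := by
    intro p hp
    rw [PySem.List.mem_enumerate_iff] at hp
    obtain ⟨k, hk, rfl⟩ := hp
    rw [contains_markFold]
    rw [any_enumerate_eq (pvBad (PySem.List.sorted pkg (fun x => x) false)) _ 0 k (by simpa using hk)]
    simp [pvBad_sorted_eq_not_fit]
  show ((PySem.List.enumerate boxes 0).foldl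
      (pvAStep ((PySem.List.enumerate (boxes.map (fun b => PySem.List.sorted b (fun x => x) false)) 0).foldl
        (pvMarkBox (PySem.List.sorted pkg (fun x => x) false)) PySem.Dict.empty)) (-1, 1, none)).1
    = pvFindFit (PySem.List.sorted pkg (fun x => x) false)
        (PySem.List.sorted (PySem.List.enumerate boxes 0) pvVolKey false)
  have hinit : ((-1 : Int), (1 : Int), (none : Option Int)) =
      (pvRes none, 1, pvBest none) := rfl
  rw [hinit, foldA_eq _ _ _ _ hyp, pvFindFit_eq_find?,
      find?_sorted_eq_fold _ _ (PySem.List.pairwise_lt_enumerate boxes 0)]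

-- ===== VERDICT (by name: the statement is the Claim_ definition above) =====
theorem packageBoxing_spec : Claim_equal_packageBoxing := by
  intro pkg boxes _dom _pre
  unfold Spec_packageBoxing
  exact final_eq pkg boxes
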